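-- pv_equiv track=rewrite | github.com/ericmerle3789/Collatz-Junction-Theorem | scripts/research/r59_variable_windows.py | compute_Nr_all
-- ===== SOURCE A (Python) =====
-- from collections import defaultdict, Counter
--
-- def compute_c_deltas(M, g, p):
--     """Compute c_delta = (1 + g*2^delta) mod p for delta = 0,...,M."""
--     return [(1 + g * pow(2, delta, p)) % p for delta in range(M + 1)]
--
-- def compute_Nr_all(M, g, p, ord2, dlog_table):
--     """Compute N_r for all r using the delta-reformulation.
--     Also returns per-delta contribution info for r*."""
--     c_deltas = compute_c_deltas(M, g, p)
--     Nr = Counter()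
--     # Track which deltas contribute for each r
--     contrib = defaultdict(list)  # r -> list of (delta, dlog_value)
--
--     for r in range(1, p):
--         for delta in range(M + 1):
--             cd = c_deltas[delta]
--             if cd == 0:
--                 continue
--             ratio = (r * pow(cd, p - 2, p)) % p
--             if ratio in dlog_table:
--                 a = dlog_table[ratio]
--                 if 0 <= a <= M - delta:
--                     Nr[r] += 1
--                     contrib[r].append((delta, a))
--
--     # Handle r=0
--     count_zero = 0
--     for delta in range(M + 1):
--         if c_deltas[delta] == 0:
--             count_zero += (M - delta + 1)
--     if count_zero > 0:
--         Nr[0] = count_zero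
--
--     return Nr, contrib, c_deltas
-- ===== SOURCE B (Python) =====
-- from collections import defaultdict, Counter
--
--
-- def _gcd(a, b):
--     while b:
--         a, b = b, a % b
--     return a
--
--
-- def _modinv(a, m):
--     # modular inverse of a mod m via extended Euclid (gcd(a, m) == 1, m >= 1)
--     x0, x1, r0, r1 = 1, 0, a, m
--     while r1:
--         s = r0 // r1
--         x0, x1 = x1, x0 - s * x1
--         r0, r1 = r1, r0 - s * r1
--     return x0 % m
--
--
-- def compute_Nr_all(M, g, p, ord2, dlog_table):
--     """Congruence-solving re-implementation: instead of scanning every residue r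
--     and looking its ratio up in dlog_table, enumerate the table entries (k, a)
--     and solve the linear congruence r * e == k (mod p) directly (gcd/extended
--     Euclid), emitting the full arithmetic progression of solutions r."""
--     c_deltas = [(1 + g * pow(2, delta, p)) % p for delta in range(M + 1)]
--     rows = [[] for _ in range(p)] if p > 0 else []
--     if p > 1:
--         for delta, cd in enumerate(c_deltas):
--             if cd == 0:
--                 continue
--             e = pow(cd, p - 2, p)
--             g0 = _gcd(p, e)
--             q = p // g0
--             inv = _modinv(e // g0, q)
--             hi = M - delta
--             for k, a in dlog_table.items():
--                 if 0 <= a <= hi and 0 <= k < p and k % g0 == 0: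
--                     r0 = ((k // g0) * inv) % q
--                     for t in range(g0):
--                         r = r0 + t * q
--                         if r >= 1:
--                             rows[r].append((delta, a))
--     Nr = Counter()
--     contrib = defaultdict(list)
--     for r in range(1, p):
--         if rows[r]:
--             Nr[r] = len(rows[r])
--             contrib[r] = rows[r]
--     count_zero = sum(M - delta + 1 for delta, cd in enumerate(c_deltas) if cd == 0)
--     if count_zero > 0:
--         Nr[0] = count_zero
--     return Nr, contrib, c_deltas
-- ===== Notes on version B (the rewrite author's own statement) =====
-- stated objective: alternative
-- what changed: Instead of scanning every residue r in [1,p) and looking r*inverse(c_delta) up in dlog_table, B enumerates the table entries (k, a) once per delta and solves the linear congruence r*e == k (mod p) directly with a hand-rolled gcd and extended-Euclid modular inverse, emitting the whole arithmetic progression of solution residues, so the per-residue loop and its dict lookups disappear; per-delta work scales with the table size rather than with p, but a timing run did not confirm a uniform speed-up, so none is claimed.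
import Mathlib
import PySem

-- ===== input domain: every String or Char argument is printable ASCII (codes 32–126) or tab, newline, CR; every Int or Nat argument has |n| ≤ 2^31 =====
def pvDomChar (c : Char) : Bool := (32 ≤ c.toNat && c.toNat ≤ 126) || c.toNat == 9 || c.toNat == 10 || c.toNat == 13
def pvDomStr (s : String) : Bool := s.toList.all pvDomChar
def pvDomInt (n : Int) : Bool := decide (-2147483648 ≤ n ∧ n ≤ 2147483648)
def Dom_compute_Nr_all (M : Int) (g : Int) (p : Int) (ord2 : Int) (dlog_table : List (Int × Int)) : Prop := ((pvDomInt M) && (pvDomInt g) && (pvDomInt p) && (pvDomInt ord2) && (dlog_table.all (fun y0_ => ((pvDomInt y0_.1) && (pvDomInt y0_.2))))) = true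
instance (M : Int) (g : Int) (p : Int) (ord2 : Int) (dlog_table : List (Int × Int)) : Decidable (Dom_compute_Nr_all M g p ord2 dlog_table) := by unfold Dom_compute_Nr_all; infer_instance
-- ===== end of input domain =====

-- B replaces A's residue-scan-and-lookup by enumerating the table entries and solving the
-- linear congruence r*e ≡ k (mod p) with gcd/extended Euclid (objective: alternative algorithm;
-- no speed claim); neither program mutates its arguments.

-- ===== PORT A =====
def compute_c_deltas (M : Int) (g : Int) (p : Int) : List Int :=
  (PySem.List.pyRange 0 (M + 1) 1).map
    (fun delta => PySem.Int.mod (1 + g * PySem.Int.powMod 2 delta.toNat p) p)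

def compute_Nr_all (M : Int) (g : Int) (p : Int) (ord2 : Int) (dlog_table : List (Int × Int)) :
    (List (Int × Int)) × (List (Int × List (Int × Int))) × List Int :=
  let c_deltas := compute_c_deltas M g p
  let dt : PySem.Dict Int Int := PySem.Dict.mk dlog_table
  let st :=
    (PySem.List.pyRange 1 p 1).foldl (fun st r =>
      (PySem.List.pyRange 0 (M + 1) 1).foldl (fun st delta =>
        let cd := PySem.List.pyGetD c_deltas delta 0  -- c_deltas[delta]; delta always in range
        if cd = 0 then st
        else
          let ratio := PySem.Int.mod (r * PySem.Int.powMod cd (p - 2).toNat p) p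
          match dt.get? ratio with  -- 'ratio in dlog_table' then 'dlog_table[ratio]'
          | some a =>
            if 0 ≤ a ∧ a ≤ M - delta then
              (st.1.modify r 0 (· + 1), st.2.modify r [] (· ++ [(delta, a)]))
            else st
          | none => st) st)
      ((PySem.Dict.empty : PySem.Dict Int Int),
       (PySem.Dict.empty : PySem.Dict Int (List (Int × Int))))
  let count_zero :=
    (PySem.List.pyRange 0 (M + 1) 1).foldl (fun acc delta =>
      if PySem.List.pyGetD c_deltas delta 0 = 0 then acc + (M - delta + 1) else acc) 0
  let Nr := if count_zero > 0 then st.1.insert 0 count_zero else st.1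
  (Nr.items, st.2.items, c_deltas)

-- ===== PORT B =====
-- _gcd(a, b): the plain Euclidean while-loop of Source B
def pyGcd (a b : Int) : Int :=
  if h : b = 0 then a
  else pyGcd b (PySem.Int.mod a b)
termination_by b.natAbs
decreasing_by
  rcases lt_or_gt_of_ne h with hb | hb
  · have h1 := PySem.Int.mod_neg_bounds (a := a) hb; omega
  · have h1 := PySem.Int.mod_nonneg (a := a) hb
    have h2 := PySem.Int.mod_lt (a := a) hb
    omega

-- the extended-Euclid while-loop of _modinv
def pyModInvLoop (x0 x1 r0 r1 : Int) : Int :=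
  if h : r1 = 0 then x0
  else
    let s := PySem.Int.floordiv r0 r1
    pyModInvLoop x1 (x0 - s * x1) r1 (r0 - s * r1)
termination_by r1.natAbs
decreasing_by
  have hm := PySem.Int.floordiv_mul_add_mod r0 r1
  rcases lt_or_gt_of_ne h with hb | hb
  · have h1 := PySem.Int.mod_neg_bounds (a := r0) hb; omega
  · have h1 := PySem.Int.mod_nonneg (a := r0) hb
    have h2 := PySem.Int.mod_lt (a := r0) hb
    omega

def pyModInv (a m : Int) : Int := PySem.Int.mod (pyModInvLoop 1 0 a m) m

-- dlog_table.items(): a Python dict has unique keys; under the assoc-list convention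
-- (first match wins) its items are exactly the first occurrence of each key.
def pyFirstOccs : List (Int × Int) → List (Int × Int)
  | [] => []
  | kv :: rest => kv :: pyFirstOccs (rest.filter (fun q => q.1 ≠ kv.1))
termination_by l => l.length
decreasing_by
  simp only [List.length_unattach, List.length_cons]
  exact Nat.lt_succ_of_le (le_trans (List.length_filter_le _ _) (by simp))

def compute_Nr_all_alt (M : Int) (g : Int) (p : Int) (ord2 : Int) (dlog_table : List (Int × Int)) :
    (List (Int × Int)) × (List (Int × List (Int × Int))) × List Int :=
  let c_deltas :=
    (PySem.List.pyRange 0 (M + 1) 1).map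
      (fun delta => PySem.Int.mod (1 + g * PySem.Int.powMod 2 delta.toNat p) p)
  let rows0 : List (List (Int × Int)) := List.replicate p.toNat []  -- [[] for _ in range(p)]
  let rows :=
    if 1 < p then
      (PySem.List.enumerate c_deltas).foldl (fun rows dc =>
        if dc.2 = 0 then rows
        else
          let e := PySem.Int.powMod dc.2 (p - 2).toNat p
          let g0 := pyGcd p e
          let q := PySem.Int.floordiv p g0
          let inv := pyModInv (PySem.Int.floordiv e g0) q
          let hi := M - dc.1
          (pyFirstOccs dlog_table).foldl (fun rows ka =>
            if 0 ≤ ka.2 ∧ ka.2 ≤ hi ∧ 0 ≤ ka.1 ∧ ka.1 < p ∧ PySem.Int.mod ka.1 g0 = 0 then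
              let r0 := PySem.Int.mod (PySem.Int.floordiv ka.1 g0 * inv) q
              (PySem.List.pyRange 0 g0 1).foldl (fun rows t =>
                let r := r0 + t * q
                -- 1 ≤ r < p, so plain Nat indexing is exact
                if 1 ≤ r then rows.set r.toNat (rows.getD r.toNat [] ++ [(dc.1, ka.2)]) else rows) rows
            else rows) rows) rows0
    else rows0
  let st :=
    (PySem.List.pyRange 1 p 1).foldl (fun st r =>
      let row := rows.getD r.toNat []
      if row ≠ [] then (st.1.insert r (row.length : Int), st.2.insert r row) else st)
      ((PySem.Dict.empty : PySem.Dict Int Int),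
       (PySem.Dict.empty : PySem.Dict Int (List (Int × Int))))
  let count_zero :=
    (((PySem.List.enumerate c_deltas).filter (fun dc => dc.2 = 0)).map (fun dc => M - dc.1 + 1)).sum
  let Nr := if count_zero > 0 then st.1.insert 0 count_zero else st.1
  (Nr.items, st.2.items, c_deltas)

-- ===== PRECONDITION & SPEC =====
-- Pre_ excludes exactly p = 0 with 0 ≤ M, where Python's pow(2, delta, 0) raises ValueError
-- (in A and in B alike); A returns normally on every other input.
def Pre_compute_Nr_all (M : Int) (g : Int) (p : Int) (ord2 : Int) (dlog_table : List (Int × Int)) : Prop :=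
  ¬ (p = 0 ∧ 0 ≤ M)
instance (M : Int) (g : Int) (p : Int) (ord2 : Int) (dlog_table : List (Int × Int)) : Decidable (Pre_compute_Nr_all M g p ord2 dlog_table) := by unfold Pre_compute_Nr_all; infer_instance

def pvWitness_compute_Nr_all : Int × Int × Int × Int × (List (Int × Int)) :=
  (3, 2, 7, 3, [(1, 0), (2, 1), (4, 2), (3, 4)])

def Spec_compute_Nr_all (M : Int) (g : Int) (p : Int) (ord2 : Int) (dlog_table : List (Int × Int)) (out : (List (Int × Int)) × (List (Int × List (Int × Int))) × List Int) : Prop := out = compute_Nr_all_alt M g p ord2 dlog_table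
instance (M : Int) (g : Int) (p : Int) (ord2 : Int) (dlog_table : List (Int × Int)) (out : (List (Int × Int)) × (List (Int × List (Int × Int))) × List Int) : Decidable (Spec_compute_Nr_all M g p ord2 dlog_table out) := by unfold Spec_compute_Nr_all; infer_instance

-- ===== CLAIM (what is proved, stated in full; the proofs are below) =====
def Claim_equal_compute_Nr_all : Prop := ∀ (M : Int) (g : Int) (p : Int) (ord2 : Int) (dlog_table : List (Int × Int)), Dom_compute_Nr_all M g p ord2 dlog_table → Pre_compute_Nr_all M g p ord2 dlog_table → Spec_compute_Nr_all M g p ord2 dlog_table (compute_Nr_all M g p ord2 dlog_table)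

-- ===== LEMMAS AND PROOFS =====

-- The outcome of one (delta, r) cell: `some (delta, a)` iff the cell contributes.
def pvHit (M : Int) (g : Int) (p : Int) (dt : PySem.Dict Int Int) (delta : Int) (r : Int) :
    Option (Int × Int) :=
  let cd := PySem.List.pyGetD (compute_c_deltas M g p) delta 0
  if cd = 0 then none
  else
    match dt.get? (PySem.Int.mod (r * PySem.Int.powMod cd (p - 2).toNat p) p) with
    | some a => if 0 ≤ a ∧ a ≤ M - delta then some (delta, a) else none
    | none => none

-- The full contribution row of residue r.
def pvRow (M : Int) (g : Int) (p : Int) (dt : PySem.Dict Int Int) (r : Int) : List (Int × Int) :=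
  (PySem.List.pyRange 0 (M + 1) 1).filterMap (fun delta => pvHit M g p dt delta r)

-- The per-r entry-at-the-end state of A's two dicts while the inner delta-loop runs.
def pvEnt (r : Int) (N : PySem.Dict Int Int) (C : PySem.Dict Int (List (Int × Int)))
    (k : List (Int × Int)) : PySem.Dict Int Int × PySem.Dict Int (List (Int × Int)) :=
  if k = [] then (N, C)
  else (PySem.Dict.mk (N.items ++ [(r, (k.length : Int))]), PySem.Dict.mk (C.items ++ [(r, k)]))

-- A's double-loop state, B's state and the two count_zero sums, as named terms.
def pvStA (M : Int) (g : Int) (p : Int) (l : List (Int × Int)) :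
    PySem.Dict Int Int × PySem.Dict Int (List (Int × Int)) :=
  (PySem.List.pyRange 1 p 1).foldl (fun st r =>
    (PySem.List.pyRange 0 (M + 1) 1).foldl (fun st delta =>
      let cd := PySem.List.pyGetD (compute_c_deltas M g p) delta 0
      if cd = 0 then st
      else
        let ratio := PySem.Int.mod (r * PySem.Int.powMod cd (p - 2).toNat p) p
        match (PySem.Dict.mk l).get? ratio with
        | some a =>
          if 0 ≤ a ∧ a ≤ M - delta then
            (st.1.modify r 0 (· + 1), st.2.modify r [] (· ++ [(delta, a)]))
          else st
        | none => st) st)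
    (PySem.Dict.empty, PySem.Dict.empty)

def pvCzA (M : Int) (g : Int) (p : Int) : Int :=
  (PySem.List.pyRange 0 (M + 1) 1).foldl (fun acc delta =>
    if PySem.List.pyGetD (compute_c_deltas M g p) delta 0 = 0 then acc + (M - delta + 1) else acc) 0

def pvRowsB (M : Int) (g : Int) (p : Int) (l : List (Int × Int)) : List (List (Int × Int)) :=
  if 1 < p then
    (PySem.List.enumerate (compute_c_deltas M g p)).foldl (fun rows dc =>
      if dc.2 = 0 then rows
      else
        let e := PySem.Int.powMod dc.2 (p - 2).toNat p
        let g0 := pyGcd p e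
        let q := PySem.Int.floordiv p g0
        let inv := pyModInv (PySem.Int.floordiv e g0) q
        let hi := M - dc.1
        (pyFirstOccs l).foldl (fun rows ka =>
          if 0 ≤ ka.2 ∧ ka.2 ≤ hi ∧ 0 ≤ ka.1 ∧ ka.1 < p ∧ PySem.Int.mod ka.1 g0 = 0 then
            let r0 := PySem.Int.mod (PySem.Int.floordiv ka.1 g0 * inv) q
            (PySem.List.pyRange 0 g0 1).foldl (fun rows t =>
              let r := r0 + t * q
              if 1 ≤ r then rows.set r.toNat (rows.getD r.toNat [] ++ [(dc.1, ka.2)]) else rows) rows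
          else rows) rows) (List.replicate p.toNat [])
  else List.replicate p.toNat []

def pvStB (M : Int) (g : Int) (p : Int) (l : List (Int × Int)) :
    PySem.Dict Int Int × PySem.Dict Int (List (Int × Int)) :=
  (PySem.List.pyRange 1 p 1).foldl (fun st r =>
    let row := (pvRowsB M g p l).getD r.toNat []
    if row ≠ [] then (st.1.insert r (row.length : Int), st.2.insert r row) else st)
    (PySem.Dict.empty, PySem.Dict.empty)

def pvCzB (M : Int) (g : Int) (p : Int) : Int :=
  (((PySem.List.enumerate (compute_c_deltas M g p)).filter (fun dc => dc.2 = 0)).map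
    (fun dc => M - dc.1 + 1)).sum

theorem pv_A_eq (M : Int) (g : Int) (p : Int) (ord2 : Int) (l : List (Int × Int)) :
    compute_Nr_all M g p ord2 l =
      ((if pvCzA M g p > 0 then (pvStA M g p l).1.insert 0 (pvCzA M g p) else (pvStA M g p l).1).items,
       (pvStA M g p l).2.items, compute_c_deltas M g p) := rfl

theorem pv_B_eq (M : Int) (g : Int) (p : Int) (ord2 : Int) (l : List (Int × Int)) :
    compute_Nr_all_alt M g p ord2 l =
      ((if pvCzB M g p > 0 then (pvStB M g p l).1.insert 0 (pvCzB M g p) else (pvStB M g p l).1).items,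
       (pvStB M g p l).2.items, compute_c_deltas M g p) := rfl

theorem pv_get?_mk_append_last {ν : Type} (d : PySem.Dict Int ν) (r : Int) (v : ν)
    (h : d.contains r = false) :
    (PySem.Dict.mk (d.items ++ [(r, v)])).get? r = some v := by
  have hf : d.items.find? (fun p => p.1 == r) = none := by
    rw [List.find?_eq_none]
    intro x hx
    have := List.any_eq_false.mp h x hx
    simpa using this
  simp [PySem.Dict.get?, List.find?_append, hf]

theorem pv_insert_overwrite_last {ν : Type} (d : PySem.Dict Int ν) (r : Int) (v w : ν)
    (h : d.contains r = false) :
    (PySem.Dict.mk (d.items ++ [(r, v)])).insert r w = PySem.Dict.mk (d.items ++ [(r, w)]) := by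
  have hc : (PySem.Dict.mk (d.items ++ [(r, v)])).contains r = true := by
    simp [PySem.Dict.contains, List.any_append]
  have h2 : List.map (fun q : Int × ν => if q.1 = r then (r, w) else q) d.items
      = List.map id d.items := by
    refine List.map_congr_left ?_
    intro q hq
    have := List.any_eq_false.mp h q hq
    simp only [beq_iff_eq] at this
    simp [this]
  simp [PySem.Dict.insert, hc, List.map_append, h2]

theorem pv_contains_mk_append_last {ν : Type} (d : PySem.Dict Int ν) (r : Int) (v : ν) (x : Int) :
    (PySem.Dict.mk (d.items ++ [(r, v)])).contains x = (d.contains x || (x == r)) := by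
  simp [PySem.Dict.contains, List.any_append, BEq.comm]

theorem pv_insert_fresh {ν : Type} (d : PySem.Dict Int ν) (r : Int) (v : ν)
    (h : d.contains r = false) :
    d.insert r v = PySem.Dict.mk (d.items ++ [(r, v)]) := by
  exact PySem.Dict.ext (PySem.Dict.items_insert_of_not_contains d v h)

theorem pv_foldl_pair {ν₁ ν₂ : Type}
    (step : (PySem.Dict Int ν₁ × PySem.Dict Int ν₂) → Int → (PySem.Dict Int ν₁ × PySem.Dict Int ν₂))
    (c : Int → Prop) [DecidablePred c] (v1 : Int → ν₁) (v2 : Int → ν₂)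
    (hstep : ∀ st r, st.1.contains r = false → st.2.contains r = false →
      step st r = if c r then (st.1.insert r (v1 r), st.2.insert r (v2 r)) else st) :
    ∀ (L : List Int), L.Nodup →
    ∀ (N : PySem.Dict Int ν₁) (C : PySem.Dict Int ν₂),
      (∀ x ∈ L, N.contains x = false) → (∀ x ∈ L, C.contains x = false) →
      L.foldl step (N, C) =
        (PySem.Dict.mk (N.items ++ (L.filter (fun r => decide (c r))).map (fun r => (r, v1 r))),
         PySem.Dict.mk (C.items ++ (L.filter (fun r => decide (c r))).map (fun r => (r, v2 r)))) := by
  intro L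
  induction L with
  | nil => intro _ N C _ _; simp
  | cons r L ih =>
    intro hnd N C hN hC
    have hNr := hN r (List.mem_cons_self ..)
    have hCr := hC r (List.mem_cons_self ..)
    have hrL : r ∉ L := (List.nodup_cons.mp hnd).1
    rw [List.foldl_cons, hstep (N, C) r hNr hCr]
    by_cases hc : c r
    · rw [if_pos hc]
      have e1 : (N.insert r (v1 r)) = PySem.Dict.mk (N.items ++ [(r, v1 r)]) :=
        pv_insert_fresh N r (v1 r) hNr
      have e2 : (C.insert r (v2 r)) = PySem.Dict.mk (C.items ++ [(r, v2 r)]) :=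
        pv_insert_fresh C r (v2 r) hCr
      rw [e1, e2, ih (List.nodup_cons.mp hnd).2 _ _
        (by intro x hx
            rw [pv_contains_mk_append_last]
            have : x ≠ r := fun e => hrL (e ▸ hx)
            simp [hN x (List.mem_cons_of_mem _ hx), this])
        (by intro x hx
            rw [pv_contains_mk_append_last]
            have : x ≠ r := fun e => hrL (e ▸ hx)
            simp [hC x (List.mem_cons_of_mem _ hx), this])]
      simp [hc]
    · rw [if_neg hc]
      rw [ih (List.nodup_cons.mp hnd).2 _ _
        (fun x hx => hN x (List.mem_cons_of_mem _ hx))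
        (fun x hx => hC x (List.mem_cons_of_mem _ hx))]
      simp [hc]

-- one modify step on the tracked entry
theorem pv_ent_step (r : Int) (N : PySem.Dict Int Int) (C : PySem.Dict Int (List (Int × Int)))
    (k : List (Int × Int)) (pa : Int × Int)
    (hN : N.contains r = false) (hC : C.contains r = false) :
    ((pvEnt r N C k).1.modify r 0 (· + 1), (pvEnt r N C k).2.modify r [] (· ++ [pa]))
      = pvEnt r N C (k ++ [pa]) := by
  by_cases hk : k = []
  · subst hk
    have e1 : pvEnt r N C [] = (N, C) := rfl
    rw [e1, List.nil_append]
    unfold PySem.Dict.modify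
    rw [PySem.Dict.getD_of_not_contains N 0 hN, PySem.Dict.getD_of_not_contains C [] hC,
        pv_insert_fresh N r _ hN, pv_insert_fresh C r _ hC]
    unfold pvEnt
    rw [if_neg (by simp : ¬([pa] = ([] : List (Int × Int))))]
    norm_num
  · have e1 : pvEnt r N C k
        = (PySem.Dict.mk (N.items ++ [(r, (k.length : Int))]), PySem.Dict.mk (C.items ++ [(r, k)])) := by
      unfold pvEnt; rw [if_neg hk]
    rw [e1]
    unfold PySem.Dict.modify PySem.Dict.getD
    rw [pv_get?_mk_append_last N r _ hN, pv_get?_mk_append_last C r _ hC]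
    simp only [Option.getD_some]
    rw [pv_insert_overwrite_last N r _ _ hN, pv_insert_overwrite_last C r _ _ hC]
    unfold pvEnt
    rw [if_neg (by simp : ¬(k ++ [pa] = []))]
    norm_num

theorem pv_innerA (M : Int) (g : Int) (p : Int) (dt : PySem.Dict Int Int) (r : Int) :
    ∀ (ds : List Int) (N : PySem.Dict Int Int) (C : PySem.Dict Int (List (Int × Int)))
      (k : List (Int × Int)),
      N.contains r = false → C.contains r = false →
      ds.foldl (fun st delta =>
        let cd := PySem.List.pyGetD (compute_c_deltas M g p) delta 0
        if cd = 0 then st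
        else
          let ratio := PySem.Int.mod (r * PySem.Int.powMod cd (p - 2).toNat p) p
          match dt.get? ratio with
          | some a =>
            if 0 ≤ a ∧ a ≤ M - delta then
              (st.1.modify r 0 (· + 1), st.2.modify r [] (· ++ [(delta, a)]))
            else st
          | none => st) (pvEnt r N C k)
      = pvEnt r N C (k ++ ds.filterMap (fun delta => pvHit M g p dt delta r)) := by
  intro ds
  induction ds with
  | nil => intro N C k _ _; simp
  | cons d ds ih =>
    intro N C k hN hC
    rw [List.foldl_cons, List.filterMap_cons]
    by_cases hcd : PySem.List.pyGetD (compute_c_deltas M g p) d 0 = 0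
    · have hhit : pvHit M g p dt d r = none := by simp [pvHit, hcd]
      rw [hhit]
      show List.foldl _ (let cd := PySem.List.pyGetD (compute_c_deltas M g p) d 0
        ; if cd = 0 then (pvEnt r N C k)
          else
            let ratio := PySem.Int.mod (r * PySem.Int.powMod cd (p - 2).toNat p) p
            match dt.get? ratio with
            | some a =>
              if 0 ≤ a ∧ a ≤ M - d then
                ((pvEnt r N C k).1.modify r 0 (· + 1), (pvEnt r N C k).2.modify r [] (· ++ [(d, a)]))
              else (pvEnt r N C k)
            | none => (pvEnt r N C k)) ds = _
      rw [if_pos hcd]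
      exact ih N C k hN hC
    · rcases hg : dt.get? (PySem.Int.mod (r * PySem.Int.powMod (PySem.List.pyGetD (compute_c_deltas M g p) d 0) (p - 2).toNat p) p) with _ | a
      · have hhit : pvHit M g p dt d r = none := by simp [pvHit, hcd, hg]
        rw [hhit]
        show List.foldl _ (let cd := PySem.List.pyGetD (compute_c_deltas M g p) d 0
          ; if cd = 0 then (pvEnt r N C k)
            else
              let ratio := PySem.Int.mod (r * PySem.Int.powMod cd (p - 2).toNat p) p
              match dt.get? ratio with
              | some a =>
                if 0 ≤ a ∧ a ≤ M - d then
                  ((pvEnt r N C k).1.modify r 0 (· + 1), (pvEnt r N C k).2.modify r [] (· ++ [(d, a)]))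
                else (pvEnt r N C k)
              | none => (pvEnt r N C k)) ds = _
        rw [if_neg hcd]
        simp only [hg]
        exact ih N C k hN hC
      · by_cases hb : 0 ≤ a ∧ a ≤ M - d
        · have hhit : pvHit M g p dt d r = some (d, a) := by simp [pvHit, hcd, hg, hb]
          rw [hhit]
          show List.foldl _ (let cd := PySem.List.pyGetD (compute_c_deltas M g p) d 0
            ; if cd = 0 then (pvEnt r N C k)
              else
                let ratio := PySem.Int.mod (r * PySem.Int.powMod cd (p - 2).toNat p) p
                match dt.get? ratio with
                | some a =>
                  if 0 ≤ a ∧ a ≤ M - d then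
                    ((pvEnt r N C k).1.modify r 0 (· + 1), (pvEnt r N C k).2.modify r [] (· ++ [(d, a)]))
                  else (pvEnt r N C k)
                | none => (pvEnt r N C k)) ds = _
          rw [if_neg hcd]
          simp only [hg, if_pos hb]
          rw [pv_ent_step r N C k (d, a) hN hC, ih N C (k ++ [(d, a)]) hN hC]
          rw [List.append_assoc]
          rfl
        · have hhit : pvHit M g p dt d r = none := by simp [pvHit, hcd, hg, hb]
          rw [hhit]
          show List.foldl _ (let cd := PySem.List.pyGetD (compute_c_deltas M g p) d 0
            ; if cd = 0 then (pvEnt r N C k)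
              else
                let ratio := PySem.Int.mod (r * PySem.Int.powMod cd (p - 2).toNat p) p
                match dt.get? ratio with
                | some a =>
                  if 0 ≤ a ∧ a ≤ M - d then
                    ((pvEnt r N C k).1.modify r 0 (· + 1), (pvEnt r N C k).2.modify r [] (· ++ [(d, a)]))
                  else (pvEnt r N C k)
                | none => (pvEnt r N C k)) ds = _
          rw [if_neg hcd]
          simp only [hg, if_neg hb]
          exact ih N C k hN hC

theorem pv_stepA (M : Int) (g : Int) (p : Int) (dt : PySem.Dict Int Int) (r : Int)
    (N : PySem.Dict Int Int) (C : PySem.Dict Int (List (Int × Int)))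
    (hN : N.contains r = false) (hC : C.contains r = false) :
    (PySem.List.pyRange 0 (M + 1) 1).foldl (fun st delta =>
        let cd := PySem.List.pyGetD (compute_c_deltas M g p) delta 0
        if cd = 0 then st
        else
          let ratio := PySem.Int.mod (r * PySem.Int.powMod cd (p - 2).toNat p) p
          match dt.get? ratio with
          | some a =>
            if 0 ≤ a ∧ a ≤ M - delta then
              (st.1.modify r 0 (· + 1), st.2.modify r [] (· ++ [(delta, a)]))
            else st
          | none => st) (N, C)
      = if ¬ (pvRow M g p dt r = []) then
          (N.insert r ((pvRow M g p dt r).length : Int), C.insert r (pvRow M g p dt r))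
        else (N, C) := by
  have h0 : (N, C) = pvEnt r N C [] := rfl
  rw [h0, pv_innerA M g p dt r _ N C [] hN hC, List.nil_append]
  by_cases hr : pvRow M g p dt r = []
  · rw [if_neg (by simpa using hr)]
    show pvEnt r N C (pvRow M g p dt r) = _
    rw [hr]
  · rw [if_pos (by simpa using hr)]
    show pvEnt r N C (pvRow M g p dt r) = _
    unfold pvEnt
    rw [if_neg hr]
    rw [pv_insert_fresh N r _ hN]
    rw [pv_insert_fresh C r _ hC]

theorem pv_foldl_add_if (f : Int → Int) (q : Int → Prop) [DecidablePred q] :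
    ∀ (l : List Int) (acc : Int),
      l.foldl (fun acc x => if q x then acc + f x else acc) acc
        = acc + ((l.filter (fun x => decide (q x))).map f).sum := by
  intro l
  induction l with
  | nil => intro acc; simp
  | cons x l ih =>
    intro acc
    rw [List.foldl_cons]
    by_cases hx : q x
    · rw [if_pos hx, ih, List.filter_cons_of_pos (by simpa using hx)]
      simp; ring
    · rw [if_neg hx, ih, List.filter_cons_of_neg (by simpa using hx)]

theorem pv_range_toNat (b : Int) :
    PySem.List.pyRange 0 ((b.toNat : Nat) : Int) 1 = PySem.List.pyRange 0 b 1 := by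
  have h : (((b.toNat : Nat) : Int) - 0).toNat = (b - 0).toNat := by omega
  rw [PySem.List.pyRange_one, PySem.List.pyRange_one, h]

theorem pv_enum_cdeltas (M : Int) (g : Int) (p : Int) :
    PySem.List.enumerate (compute_c_deltas M g p)
      = (PySem.List.pyRange 0 (M + 1) 1).map
          (fun j => (j, PySem.List.pyGetD (compute_c_deltas M g p) j 0)) := by
  rw [PySem.List.enumerate_eq_map_pyRange (compute_c_deltas M g p) 0]
  congr 1
  have hlen : (compute_c_deltas M g p).length = (M + 1).toNat := by
    unfold compute_c_deltas
    rw [List.length_map, PySem.List.length_pyRange_one]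
    omega
  show PySem.List.pyRange 0 (PySem.List.len (compute_c_deltas M g p)) 1 = _
  unfold PySem.List.len
  rw [hlen, pv_range_toNat]

-- ---- B-side number theory ----

theorem pvGcd_mod (a b : Int) : Int.gcd b (a % b) = Int.gcd a b := by
  have h : a % b = a + b * (-(a / b)) := by rw [Int.emod_def]; ring
  rw [h, Int.gcd_add_mul_left_right, Int.gcd_comm]

theorem pyGcd_eq_aux : ∀ (n : Nat) (a b : Int), b.natAbs ≤ n → 0 ≤ a → 0 ≤ b →
    pyGcd a b = (Int.gcd a b : Int) := by
  intro n
  induction n with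
  | zero =>
    intro a b h ha hb
    have hb0 : b = 0 := by omega
    subst hb0
    rw [pyGcd]
    simp [Int.gcd_zero_right, Int.natAbs_of_nonneg ha]
  | succ n ih =>
    intro a b h ha hb
    by_cases hb0 : b = 0
    · subst hb0
      rw [pyGcd]
      simp [Int.gcd_zero_right, Int.natAbs_of_nonneg ha]
    · have hbpos : 0 < b := lt_of_le_of_ne hb (Ne.symm hb0)
      rw [pyGcd, dif_neg hb0]
      have hm : PySem.Int.mod a b = a % b := PySem.Int.mod_eq_emod_of_pos hbpos
      rw [hm]
      have hge : 0 ≤ a % b := Int.emod_nonneg a (ne_of_gt hbpos)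
      have hlt : a % b < b := Int.emod_lt_of_pos a hbpos
      rw [ih b (a % b) (by omega) hb hge, pvGcd_mod]

theorem pyGcd_eq (a b : Int) (ha : 0 ≤ a) (hb : 0 ≤ b) : pyGcd a b = (Int.gcd a b : Int) :=
  pyGcd_eq_aux b.natAbs a b le_rfl ha hb

theorem pvLoop_spec (a m : Int) : ∀ (n : Nat) (x0 x1 r0 r1 : Int), r1.natAbs ≤ n → 0 ≤ r0 → 0 ≤ r1 →
    x0 * a ≡ r0 [ZMOD m] → x1 * a ≡ r1 [ZMOD m] →
    pyModInvLoop x0 x1 r0 r1 * a ≡ (Int.gcd r0 r1 : Int) [ZMOD m] := by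
  intro n
  induction n with
  | zero =>
    intro x0 x1 r0 r1 h hr0 hr1 h0 h1
    have hz : r1 = 0 := by omega
    subst hz
    rw [pyModInvLoop]
    simpa [Int.gcd_zero_right, Int.natAbs_of_nonneg hr0] using h0
  | succ n ih =>
    intro x0 x1 r0 r1 h hr0 hr1 h0 h1
    by_cases hz : r1 = 0
    · subst hz
      rw [pyModInvLoop]
      simpa [Int.gcd_zero_right, Int.natAbs_of_nonneg hr0] using h0
    · have hpos : 0 < r1 := lt_of_le_of_ne hr1 (Ne.symm hz)
      rw [pyModInvLoop, dif_neg hz]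
      have hmod : r0 - PySem.Int.floordiv r0 r1 * r1 = r0 % r1 := by
        have h1' := PySem.Int.floordiv_mul_add_mod r0 r1
        have h2' : PySem.Int.mod r0 r1 = r0 % r1 := PySem.Int.mod_eq_emod_of_pos hpos
        omega
      have hge : 0 ≤ r0 % r1 := Int.emod_nonneg r0 (ne_of_gt hpos)
      have hlt : r0 % r1 < r1 := Int.emod_lt_of_pos r0 hpos
      have hinv2 : (x0 - PySem.Int.floordiv r0 r1 * x1) * a
          ≡ r0 - PySem.Int.floordiv r0 r1 * r1 [ZMOD m] := by
        have hs := Int.ModEq.mul_left (PySem.Int.floordiv r0 r1) h1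
        have := h0.sub hs
        calc (x0 - PySem.Int.floordiv r0 r1 * x1) * a
            = x0 * a - PySem.Int.floordiv r0 r1 * (x1 * a) := by ring
          _ ≡ r0 - PySem.Int.floordiv r0 r1 * r1 [ZMOD m] := this
      have key := ih x1 (x0 - PySem.Int.floordiv r0 r1 * x1) r1
        (r0 - PySem.Int.floordiv r0 r1 * r1) (by omega) hr1 (by omega) h1 hinv2
      have hg : (Int.gcd r1 (r0 - PySem.Int.floordiv r0 r1 * r1) : Int) = (Int.gcd r0 r1 : Int) := by
        rw [hmod, pvGcd_mod]
      rw [hg] at key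
      exact key

theorem pyModInv_spec (a m : Int) (ha : 0 ≤ a) (hm : 0 < m) (hg : Int.gcd a m = 1) :
    pyModInv a m * a ≡ 1 [ZMOD m] := by
  have h0 : (1 : Int) * a ≡ a [ZMOD m] := by rw [one_mul]
  have h1 : (0 : Int) * a ≡ m [ZMOD m] := by
    rw [zero_mul]
    have : m ≡ 0 [ZMOD m] := Int.modEq_zero_iff_dvd.mpr dvd_rfl
    exact this.symm
  have key := pvLoop_spec a m m.natAbs 1 0 a m le_rfl ha (le_of_lt hm) h0 h1
  rw [hg] at key
  unfold pyModInv
  rw [PySem.Int.mod_eq_emod_of_pos hm]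
  have hmm : pyModInvLoop 1 0 a m % m ≡ pyModInvLoop 1 0 a m [ZMOD m] :=
    Int.emod_emod_of_dvd _ dvd_rfl
  calc pyModInvLoop 1 0 a m % m * a ≡ pyModInvLoop 1 0 a m * a [ZMOD m] := hmm.mul_right a
    _ ≡ ((1 : Nat) : Int) [ZMOD m] := key
    _ = 1 := by norm_num

theorem pv_sols_core (p e k G q iv : Int)
    (hp0 : 0 < p) (hGpos : 0 < G) (hGe : G ∣ e) (hGk : G ∣ k)
    (hpq : G * q = p) (hq0 : 0 < q)
    (hiv : iv * (e / G) ≡ 1 [ZMOD q])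
    (hcop : Int.gcd (e / G) q = 1)
    (hk0 : 0 ≤ k) (hkp : k < p)
    (j : Int) (hj0 : 0 ≤ j) (hjp : j < p) :
    ((∃ t : Int, (0 ≤ t ∧ t < G) ∧ j = (k / G * iv) % q + t * q) ↔ (j * e) % p = k) := by
  set r0 := (k / G * iv) % q with hr0d
  have hr00 : 0 ≤ r0 := Int.emod_nonneg _ (ne_of_gt hq0)
  have hr0q : r0 < q := Int.emod_lt_of_pos _ hq0
  have he' : G * (e / G) = e := Int.mul_ediv_cancel' hGe
  have hk' : G * (k / G) = k := Int.mul_ediv_cancel' hGk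
  have hsol0 : r0 * e ≡ k [ZMOD p] := by
    have h1 : r0 ≡ k / G * iv [ZMOD q] := Int.emod_emod_of_dvd _ dvd_rfl
    have h2 : r0 * (e / G) ≡ k / G * (iv * (e / G)) [ZMOD q] := by
      calc r0 * (e / G) ≡ (k / G * iv) * (e / G) [ZMOD q] := h1.mul_right _
        _ = k / G * (iv * (e / G)) := by ring
    have h3 : r0 * (e / G) ≡ k / G [ZMOD q] := by
      calc r0 * (e / G) ≡ k / G * (iv * (e / G)) [ZMOD q] := h2
        _ ≡ k / G * 1 [ZMOD q] := hiv.mul_left (k / G)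
        _ = k / G := by ring
    have h5 := h3.mul_left' (c := G)
    have h6 : G * (r0 * (e / G)) = r0 * e := by
      rw [show G * (r0 * (e / G)) = r0 * (G * (e / G)) by ring, he']
    rw [h6, hk', hpq] at h5
    exact h5
  have hkk : k % p = k := Int.emod_eq_of_lt hk0 hkp
  have hr0e : (r0 * e) % p = k := by
    have h7 : (r0 * e) % p = k % p := hsol0
    rw [hkk] at h7
    exact h7
  constructor
  · rintro ⟨t, ⟨ht0, htG⟩, rfl⟩
    have hqe : p ∣ t * q * e := by
      refine ⟨t * (e / G), ?_⟩
      calc t * q * e = t * q * (G * (e / G)) := by rw [he']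
        _ = G * q * (t * (e / G)) := by ring
        _ = p * (t * (e / G)) := by rw [hpq]
    have h8 : (r0 + t * q) * e ≡ r0 * e [ZMOD p] := by
      refine Int.modEq_iff_dvd.mpr ?_
      rw [show r0 * e - (r0 + t * q) * e = -(t * q * e) by ring]
      exact dvd_neg.mpr hqe
    have h9 : ((r0 + t * q) * e) % p = (r0 * e) % p := h8
    rw [h9, hr0e]
  · intro hsol
    have hjr : j * e ≡ r0 * e [ZMOD p] := by
      show (j * e) % p = (r0 * e) % p
      rw [hsol, hr0e]
    have hd : p ∣ (j - r0) * e := by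
      have h10 := Int.ModEq.dvd hjr
      rw [show (j - r0) * e = -(r0 * e - j * e) by ring]
      exact dvd_neg.mpr h10
    have hqd : q ∣ j - r0 := by
      have h11 : G * q ∣ G * ((j - r0) * (e / G)) := by
        rw [hpq, show G * ((j - r0) * (e / G)) = (j - r0) * (G * (e / G)) by ring, he']
        exact hd
      have h12 : q ∣ (j - r0) * (e / G) := (mul_dvd_mul_iff_left (ne_of_gt hGpos)).mp h11
      have hco : IsCoprime q (e / G) := by
        rw [Int.isCoprime_iff_gcd_eq_one, Int.gcd_comm]
        exact hcop
      exact hco.dvd_of_dvd_mul_right h12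
    obtain ⟨t, ht⟩ := hqd
    refine ⟨t, ⟨?_, ?_⟩, by linear_combination ht⟩
    · by_contra hneg
      push_neg at hneg
      have h13 : q * t ≤ q * (-1) := mul_le_mul_of_nonneg_left (by omega) (le_of_lt hq0)
      have h14 : q * (-1) = -q := by ring
      linarith
    · by_contra hneg
      push_neg at hneg
      have h15 : q * G ≤ q * t := mul_le_mul_of_nonneg_left hneg (le_of_lt hq0)
      have h16 : q * G = p := by rw [mul_comm]; exact hpq
      linarith

-- the solution set of r * e ≡ k (mod p), as emitted by B
theorem pv_sols (p e k : Int) (hp : 2 ≤ p) (he0 : 0 ≤ e) (hep : e < p)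
    (hk0 : 0 ≤ k) (hkp : k < p) (hkg : PySem.Int.mod k (pyGcd p e) = 0)
    (j : Int) (hj0 : 0 ≤ j) (hjp : j < p) :
    ((∃ t ∈ PySem.List.pyRange 0 (pyGcd p e) 1,
        j = PySem.Int.mod (PySem.Int.floordiv k (pyGcd p e) *
              pyModInv (PySem.Int.floordiv e (pyGcd p e)) (PySem.Int.floordiv p (pyGcd p e)))
            (PySem.Int.floordiv p (pyGcd p e)) + t * PySem.Int.floordiv p (pyGcd p e))
      ↔ PySem.Int.mod (j * e) p = k) := by
  have hp0 : 0 < p := by omega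
  have hG : pyGcd p e = ((Int.gcd p e : Nat) : Int) := pyGcd_eq p e (by omega) he0
  have hGpos : 0 < ((Int.gcd p e : Nat) : Int) := by
    have hne : Int.gcd p e ≠ 0 := by
      intro h
      rw [Int.gcd_eq_zero_iff] at h
      omega
    exact_mod_cast Nat.pos_of_ne_zero hne
  have hGk : ((Int.gcd p e : Nat) : Int) ∣ k := by
    rw [hG] at hkg
    exact (PySem.Int.mod_eq_zero_iff_dvd k _).mp hkg
  have hpq : ((Int.gcd p e : Nat) : Int) * (p / ((Int.gcd p e : Nat) : Int)) = p :=
    Int.mul_ediv_cancel' (Int.gcd_dvd_left p e)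
  have hq0 : 0 < p / ((Int.gcd p e : Nat) : Int) := by
    by_contra hle
    push_neg at hle
    have := mul_nonpos_of_nonneg_of_nonpos (le_of_lt hGpos) hle
    omega
  have hcop : Int.gcd (e / ((Int.gcd p e : Nat) : Int)) (p / ((Int.gcd p e : Nat) : Int)) = 1 := by
    have h2 : 0 < Int.gcd e p := by
      rw [Int.gcd_comm]
      exact_mod_cast hGpos
    have h3 := Int.gcd_div_gcd_div_gcd h2
    rw [Int.gcd_comm e p] at h3
    exact h3
  have hinv := pyModInv_spec (e / ((Int.gcd p e : Nat) : Int)) (p / ((Int.gcd p e : Nat) : Int))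
    (Int.ediv_nonneg he0 (le_of_lt hGpos)) hq0 hcop
  have core := pv_sols_core p e k ((Int.gcd p e : Nat) : Int) (p / ((Int.gcd p e : Nat) : Int))
    (pyModInv (e / ((Int.gcd p e : Nat) : Int)) (p / ((Int.gcd p e : Nat) : Int)))
    hp0 hGpos (Int.gcd_dvd_right p e) hGk hpq hq0 hinv hcop hk0 hkp j hj0 hjp
  have hfq : PySem.Int.floordiv p (pyGcd p e) = p / ((Int.gcd p e : Nat) : Int) := by
    rw [hG]; exact PySem.Int.floordiv_eq_ediv_of_pos hGpos
  have hfe : PySem.Int.floordiv e (pyGcd p e) = e / ((Int.gcd p e : Nat) : Int) := by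
    rw [hG]; exact PySem.Int.floordiv_eq_ediv_of_pos hGpos
  have hfk : PySem.Int.floordiv k (pyGcd p e) = k / ((Int.gcd p e : Nat) : Int) := by
    rw [hG]; exact PySem.Int.floordiv_eq_ediv_of_pos hGpos
  rw [PySem.Int.mod_eq_emod_of_pos hp0]
  rw [← core]
  constructor
  · rintro ⟨t, htm, hte⟩
    rw [PySem.List.mem_pyRange_one, hG] at htm
    rw [hfq, hfe, hfk, PySem.Int.mod_eq_emod_of_pos hq0] at hte
    exact ⟨t, ⟨htm.1, htm.2⟩, hte⟩
  · rintro ⟨t, ⟨ht0, htG⟩, hte⟩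
    refine ⟨t, ?_, ?_⟩
    · rw [PySem.List.mem_pyRange_one, hG]
      exact ⟨ht0, htG⟩
    · rw [hfq, hfe, hfk, PySem.Int.mod_eq_emod_of_pos hq0]
      exact hte

-- ---- pyFirstOccs ----

theorem pv_fo_mem : ∀ (n : Nat) (l : List (Int × Int)), l.length ≤ n →
    ∀ x, x ∈ pyFirstOccs l → x ∈ l := by
  intro n
  induction n with
  | zero =>
    intro l h x hx
    have : l = [] := by
      cases l with
      | nil => rfl
      | cons a l => simp at h
    subst this
    simpa [pyFirstOccs] using hx
  | succ n ih =>
    intro l h x hx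
    cases l with
    | nil => simpa [pyFirstOccs] using hx
    | cons kv rest =>
      rw [pyFirstOccs] at hx
      rcases List.mem_cons.mp hx with h1 | h1
      · simp [h1]
      · have hlen : (rest.filter (fun q => q.1 ≠ kv.1)).length ≤ n := by
          have := List.length_filter_le (fun q : Int × Int => decide (q.1 ≠ kv.1)) rest
          simp at h
          omega
        have := ih _ hlen x h1
        exact List.mem_cons_of_mem _ (List.mem_of_mem_filter this)

theorem pv_fo_nodup : ∀ (n : Nat) (l : List (Int × Int)), l.length ≤ n →
    ((pyFirstOccs l).map (fun ka => ka.1)).Nodup := by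
  intro n
  induction n with
  | zero =>
    intro l h
    have : l = [] := by
      cases l with
      | nil => rfl
      | cons a l => simp at h
    subst this
    simp [pyFirstOccs]
  | succ n ih =>
    intro l h
    cases l with
    | nil => simp [pyFirstOccs]
    | cons kv rest =>
      rw [pyFirstOccs]
      have hlen : (rest.filter (fun q => q.1 ≠ kv.1)).length ≤ n := by
        have := List.length_filter_le (fun q : Int × Int => decide (q.1 ≠ kv.1)) rest
        simp at h
        omega
      rw [List.map_cons, List.nodup_cons]
      refine ⟨?_, ih _ hlen⟩
      intro hmem
      obtain ⟨y, hy, hy1⟩ := List.mem_map.mp hmem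
      have hyf := pv_fo_mem _ _ hlen y hy
      have := List.of_mem_filter hyf
      simp at this
      exact this hy1

theorem pv_find_filter (d c : Int) (hcd : c ≠ d) :
    ∀ (L : List (Int × Int)),
      (L.filter (fun q => q.1 ≠ d)).find? (fun q => q.1 == c) = L.find? (fun q => q.1 == c) := by
  intro L
  induction L with
  | nil => simp
  | cons q L ih =>
    by_cases hq : q.1 = d
    · rw [List.filter_cons_of_neg (by simp [hq])]
      rw [ih]
      rw [List.find?_cons_of_neg (a := q) (p := fun ka => ka.1 == c) (by simp [hq]; omega)]
    · rw [List.filter_cons_of_pos (by simp [hq])]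
      by_cases hc : q.1 = c
      · rw [List.find?_cons_of_pos (a := q) (p := fun ka => ka.1 == c) (by simp [hc]),
            List.find?_cons_of_pos (a := q) (p := fun ka => ka.1 == c) (by simp [hc])]
      · rw [List.find?_cons_of_neg (a := q) (p := fun ka => ka.1 == c) (by simp [hc]),
            List.find?_cons_of_neg (a := q) (p := fun ka => ka.1 == c) (by simp [hc]), ih]

theorem pv_fo_find : ∀ (n : Nat) (l : List (Int × Int)), l.length ≤ n → ∀ c,
    (pyFirstOccs l).find? (fun ka => ka.1 == c) = l.find? (fun ka => ka.1 == c) := by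
  intro n
  induction n with
  | zero =>
    intro l h c
    have : l = [] := by
      cases l with
      | nil => rfl
      | cons a l => simp at h
    subst this
    simp [pyFirstOccs]
  | succ n ih =>
    intro l h c
    cases l with
    | nil => simp [pyFirstOccs]
    | cons kv rest =>
      rw [pyFirstOccs]
      have hlen : (rest.filter (fun q => q.1 ≠ kv.1)).length ≤ n := by
        have := List.length_filter_le (fun q : Int × Int => decide (q.1 ≠ kv.1)) rest
        simp at h
        omega
      by_cases hc : kv.1 = c
      · rw [List.find?_cons_of_pos (a := kv) (p := fun ka => ka.1 == c) (by simp [hc]),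
            List.find?_cons_of_pos (a := kv) (p := fun ka => ka.1 == c) (by simp [hc])]
      · rw [List.find?_cons_of_neg (a := kv) (p := fun ka => ka.1 == c) (by simp [hc]),
            List.find?_cons_of_neg (a := kv) (p := fun ka => ka.1 == c) (by simp [hc])]
        rw [ih _ hlen c, pv_find_filter kv.1 c (fun e => hc e.symm)]

theorem pv_get?_eq_find (l : List (Int × Int)) (c : Int) :
    (PySem.Dict.mk l).get? c = (l.find? (fun ka => ka.1 == c)).map (fun ka => ka.2) := by
  induction l with
  | nil => simp [PySem.Dict.get?]
  | cons kv rest ih =>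
    rw [show (kv :: rest) = ((kv.1, kv.2) :: rest) by rfl]
    rw [PySem.Dict.get?_mk_cons]
    by_cases hc : kv.1 = c
    · rw [List.find?_cons_of_pos (a := (kv.1, kv.2)) (p := fun ka => ka.1 == c) (by simp [hc])]
      simp [hc]
    · rw [List.find?_cons_of_neg (a := (kv.1, kv.2)) (p := fun ka => ka.1 == c) (by simp [hc])]
      have hb : (kv.1 == c) = false := by simp [hc]
      simp only [hb, Bool.false_eq_true, if_false]
      exact ih

theorem pv_fmkey (c d lo hi : Int) (P : Prop) [Decidable P] :
    ∀ (L : List (Int × Int)), ((L.map (fun ka => ka.1)).Nodup) →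
      L.filterMap (fun ka => if P ∧ lo ≤ ka.2 ∧ ka.2 ≤ hi ∧ c = ka.1 then some (d, ka.2) else none)
      = match L.find? (fun ka => ka.1 == c) with
        | some ka => if P ∧ lo ≤ ka.2 ∧ ka.2 ≤ hi then [(d, ka.2)] else []
        | none => [] := by
  intro L
  induction L with
  | nil => intro _; simp
  | cons ka L ih =>
    intro hnd
    rw [List.map_cons, List.nodup_cons] at hnd
    rw [List.filterMap_cons]
    by_cases hk : ka.1 = c
    · rw [List.find?_cons_of_pos (a := ka) (p := fun kb => kb.1 == c) (by simp [hk])]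
      have htail : L.filterMap (fun ka => if P ∧ lo ≤ ka.2 ∧ ka.2 ≤ hi ∧ c = ka.1
          then some (d, ka.2) else none) = [] := by
        rw [List.filterMap_eq_nil_iff]
        intro kb hkb
        have : kb.1 ≠ c := by
          intro he
          exact hnd.1 (List.mem_map.mpr ⟨kb, hkb, by omega⟩)
        rw [if_neg]
        intro hcon
        exact this hcon.2.2.2.symm
      by_cases hP : P ∧ lo ≤ ka.2 ∧ ka.2 ≤ hi
      · rw [if_pos ⟨hP.1, hP.2.1, hP.2.2, hk.symm⟩, htail]
        simp [hP]
      · rw [if_neg (fun hcon => hP ⟨hcon.1, hcon.2.1, hcon.2.2.1⟩), htail]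
        simp [hP]
    · rw [List.find?_cons_of_neg (a := ka) (p := fun kb => kb.1 == c) (by simp [hk])]
      rw [if_neg (fun hcon => hk hcon.2.2.2.symm)]
      exact ih hnd.2

-- ---- the inner t-fold of B ----

theorem pv_tfold (r0 q G : Int) (P : Nat) (v : Int × Int) (hq : 0 < q)
    (hbound : ∀ t : Int, 0 ≤ t → t < G → 0 ≤ r0 + t * q ∧ r0 + t * q < (P : Int)) :
    ∀ (n : Nat) (t0 : Int), (G - t0).toNat ≤ n → 0 ≤ t0 →
    ∀ rows : List (List (Int × Int)), rows.length = P →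
      (((PySem.List.pyRange t0 G 1).foldl (fun rows t =>
          if 1 ≤ r0 + t * q then
            rows.set (r0 + t * q).toNat (rows.getD (r0 + t * q).toNat [] ++ [v]) else rows) rows).length = P ∧
       ∀ j : Nat, j < P →
        ((PySem.List.pyRange t0 G 1).foldl (fun rows t =>
          if 1 ≤ r0 + t * q then
            rows.set (r0 + t * q).toNat (rows.getD (r0 + t * q).toNat [] ++ [v]) else rows) rows).getD j []
        = rows.getD j [] ++
            (if 1 ≤ (j : Int) ∧ ∃ t ∈ PySem.List.pyRange t0 G 1, (j : Int) = r0 + t * q then [v] else [])) := by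
  intro n
  induction n with
  | zero =>
    intro t0 h ht0 rows hlen
    have hnil : PySem.List.pyRange t0 G 1 = [] := PySem.List.pyRange_one_eq_nil (by omega)
    rw [hnil]
    refine ⟨hlen, fun j hj => ?_⟩
    simp
  | succ n ih =>
    intro t0 h ht0 rows hlen
    by_cases hGt : G ≤ t0
    · have hnil : PySem.List.pyRange t0 G 1 = [] := PySem.List.pyRange_one_eq_nil hGt
      rw [hnil]
      refine ⟨hlen, fun j hj => ?_⟩
      simp
    · rw [PySem.List.pyRange_one_cons (by omega)]
      simp only [List.foldl_cons]
      obtain ⟨hb0, hbP⟩ := hbound t0 ht0 (by omega)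
      by_cases hr1 : 1 ≤ r0 + t0 * q
      · rw [if_pos hr1]
        have hlen' : (rows.set (r0 + t0 * q).toNat (rows.getD (r0 + t0 * q).toNat [] ++ [v])).length = P := by
          rw [List.length_set]; exact hlen
        obtain ⟨l1, l2⟩ := ih (t0 + 1) (by omega) (by omega) _ hlen'
        refine ⟨l1, fun j hj => ?_⟩
        rw [l2 j hj]
        by_cases hje : (j : Int) = r0 + t0 * q
        · have hjn : (r0 + t0 * q).toNat = j := by omega
          have hjlen : j < rows.length := by omega
          have hset : (rows.set (r0 + t0 * q).toNat (rows.getD (r0 + t0 * q).toNat [] ++ [v])).getD j []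
              = rows.getD j [] ++ [v] := by
            rw [hjn]
            simp [List.getD_eq_getElem?_getD, hjlen]
          rw [hset]
          have htail : ¬ (1 ≤ (j : Int) ∧ ∃ t ∈ PySem.List.pyRange (t0 + 1) G 1, (j : Int) = r0 + t * q) := by
            rintro ⟨-, t, htm, hte⟩
            rw [PySem.List.mem_pyRange_one] at htm
            have hq1 : t * q = t0 * q := by linarith
            have : t = t0 := mul_right_cancel₀ (ne_of_gt hq) hq1
            omega
          rw [if_neg htail, List.append_nil]
          have hhead : (1 ≤ (j : Int) ∧ ∃ t ∈ t0 :: PySem.List.pyRange (t0 + 1) G 1, (j : Int) = r0 + t * q) :=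
            ⟨by omega, t0, List.mem_cons_self .., hje⟩
          rw [if_pos hhead]
        · have hjn : (r0 + t0 * q).toNat ≠ j := by omega
          have hset : (rows.set (r0 + t0 * q).toNat (rows.getD (r0 + t0 * q).toNat [] ++ [v])).getD j []
              = rows.getD j [] := by
            rw [List.getD_eq_getElem?_getD, List.getElem?_set_ne hjn, ← List.getD_eq_getElem?_getD]
          rw [hset]
          have hcong : (1 ≤ (j : Int) ∧ ∃ t ∈ PySem.List.pyRange (t0 + 1) G 1, (j : Int) = r0 + t * q)
              ↔ (1 ≤ (j : Int) ∧ ∃ t ∈ t0 :: PySem.List.pyRange (t0 + 1) G 1, (j : Int) = r0 + t * q) := by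
            constructor
            · rintro ⟨hj1, t, htm, hte⟩
              exact ⟨hj1, t, List.mem_cons_of_mem _ htm, hte⟩
            · rintro ⟨hj1, t, htm, hte⟩
              rcases List.mem_cons.mp htm with he | htm'
              · exact absurd (by rw [he] at hte; exact hte) hje
              · exact ⟨hj1, t, htm', hte⟩
          rw [if_congr hcong rfl rfl]
      · rw [if_neg hr1]
        obtain ⟨l1, l2⟩ := ih (t0 + 1) (by omega) (by omega) rows hlen
        refine ⟨l1, fun j hj => ?_⟩
        rw [l2 j hj]
        have hcong : (1 ≤ (j : Int) ∧ ∃ t ∈ PySem.List.pyRange (t0 + 1) G 1, (j : Int) = r0 + t * q)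
            ↔ (1 ≤ (j : Int) ∧ ∃ t ∈ t0 :: PySem.List.pyRange (t0 + 1) G 1, (j : Int) = r0 + t * q) := by
          constructor
          · rintro ⟨hj1, t, htm, hte⟩
            exact ⟨hj1, t, List.mem_cons_of_mem _ htm, hte⟩
          · rintro ⟨hj1, t, htm, hte⟩
            rcases List.mem_cons.mp htm with he | htm'
            · rw [he] at hte
              have := not_le.mp hr1
              exact absurd hte (by intro hx; rw [hx] at hj1; linarith)
            · exact ⟨hj1, t, htm', hte⟩
        rw [if_congr hcong rfl rfl]

-- ---- the entries fold of B, one delta ----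

theorem pv_entries (M d p e : Int) (hp : 2 ≤ p) (he0 : 0 ≤ e) (hep : e < p) :
    ∀ (L : List (Int × Int)) (rows : List (List (Int × Int))), rows.length = p.toNat →
      ((L.foldl (fun rows ka =>
          if 0 ≤ ka.2 ∧ ka.2 ≤ M - d ∧ 0 ≤ ka.1 ∧ ka.1 < p ∧ PySem.Int.mod ka.1 (pyGcd p e) = 0 then
            (PySem.List.pyRange 0 (pyGcd p e) 1).foldl (fun rows t =>
              if 1 ≤ PySem.Int.mod (PySem.Int.floordiv ka.1 (pyGcd p e) *
                    pyModInv (PySem.Int.floordiv e (pyGcd p e)) (PySem.Int.floordiv p (pyGcd p e)))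
                  (PySem.Int.floordiv p (pyGcd p e)) + t * PySem.Int.floordiv p (pyGcd p e) then
                rows.set (PySem.Int.mod (PySem.Int.floordiv ka.1 (pyGcd p e) *
                    pyModInv (PySem.Int.floordiv e (pyGcd p e)) (PySem.Int.floordiv p (pyGcd p e)))
                  (PySem.Int.floordiv p (pyGcd p e)) + t * PySem.Int.floordiv p (pyGcd p e)).toNat
                  ((rows.getD (PySem.Int.mod (PySem.Int.floordiv ka.1 (pyGcd p e) *
                    pyModInv (PySem.Int.floordiv e (pyGcd p e)) (PySem.Int.floordiv p (pyGcd p e)))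
                  (PySem.Int.floordiv p (pyGcd p e)) + t * PySem.Int.floordiv p (pyGcd p e)).toNat []) ++ [(d, ka.2)])
              else rows) rows
          else rows) rows).length = p.toNat ∧
       ∀ j : Nat, j < p.toNat →
        (L.foldl (fun rows ka =>
          if 0 ≤ ka.2 ∧ ka.2 ≤ M - d ∧ 0 ≤ ka.1 ∧ ka.1 < p ∧ PySem.Int.mod ka.1 (pyGcd p e) = 0 then
            (PySem.List.pyRange 0 (pyGcd p e) 1).foldl (fun rows t =>
              if 1 ≤ PySem.Int.mod (PySem.Int.floordiv ka.1 (pyGcd p e) *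
                    pyModInv (PySem.Int.floordiv e (pyGcd p e)) (PySem.Int.floordiv p (pyGcd p e)))
                  (PySem.Int.floordiv p (pyGcd p e)) + t * PySem.Int.floordiv p (pyGcd p e) then
                rows.set (PySem.Int.mod (PySem.Int.floordiv ka.1 (pyGcd p e) *
                    pyModInv (PySem.Int.floordiv e (pyGcd p e)) (PySem.Int.floordiv p (pyGcd p e)))
                  (PySem.Int.floordiv p (pyGcd p e)) + t * PySem.Int.floordiv p (pyGcd p e)).toNat
                  ((rows.getD (PySem.Int.mod (PySem.Int.floordiv ka.1 (pyGcd p e) *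
                    pyModInv (PySem.Int.floordiv e (pyGcd p e)) (PySem.Int.floordiv p (pyGcd p e)))
                  (PySem.Int.floordiv p (pyGcd p e)) + t * PySem.Int.floordiv p (pyGcd p e)).toNat []) ++ [(d, ka.2)])
              else rows) rows
          else rows) rows).getD j []
        = rows.getD j [] ++
            (L.filterMap (fun ka =>
              if 1 ≤ (j : Int) ∧ 0 ≤ ka.2 ∧ ka.2 ≤ M - d ∧ PySem.Int.mod ((j : Int) * e) p = ka.1
              then some (d, ka.2) else none))) := by
  have hp0 : 0 < p := by omega
  have hG : pyGcd p e = ((Int.gcd p e : Nat) : Int) := pyGcd_eq p e (by omega) he0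
  have hGpos : 0 < pyGcd p e := by
    rw [hG]
    have hne : Int.gcd p e ≠ 0 := by
      intro h
      rw [Int.gcd_eq_zero_iff] at h
      omega
    exact_mod_cast Nat.pos_of_ne_zero hne
  have hGp' : pyGcd p e ∣ p := by rw [hG]; exact Int.gcd_dvd_left p e
  have hGe' : pyGcd p e ∣ e := by rw [hG]; exact Int.gcd_dvd_right p e
  have hfq : PySem.Int.floordiv p (pyGcd p e) = p / pyGcd p e :=
    PySem.Int.floordiv_eq_ediv_of_pos hGpos
  have hpq' : pyGcd p e * PySem.Int.floordiv p (pyGcd p e) = p := by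
    rw [hfq]
    exact Int.mul_ediv_cancel' hGp'
  have hq0' : 0 < PySem.Int.floordiv p (pyGcd p e) := by
    by_contra hle
    push_neg at hle
    have := mul_nonpos_of_nonneg_of_nonpos (le_of_lt hGpos) hle
    omega
  intro L
  induction L with
  | nil =>
    intro rows hlen
    exact ⟨hlen, fun j hj => by simp⟩
  | cons ka L ih =>
    intro rows hlen
    simp only [List.foldl_cons]
    by_cases hc : 0 ≤ ka.2 ∧ ka.2 ≤ M - d ∧ 0 ≤ ka.1 ∧ ka.1 < p ∧ PySem.Int.mod ka.1 (pyGcd p e) = 0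
    · rw [if_pos hc]
      have hbound : ∀ t : Int, 0 ≤ t → t < pyGcd p e →
          0 ≤ PySem.Int.mod (PySem.Int.floordiv ka.1 (pyGcd p e) *
                pyModInv (PySem.Int.floordiv e (pyGcd p e)) (PySem.Int.floordiv p (pyGcd p e)))
              (PySem.Int.floordiv p (pyGcd p e)) + t * PySem.Int.floordiv p (pyGcd p e) ∧
          PySem.Int.mod (PySem.Int.floordiv ka.1 (pyGcd p e) *
                pyModInv (PySem.Int.floordiv e (pyGcd p e)) (PySem.Int.floordiv p (pyGcd p e)))
              (PySem.Int.floordiv p (pyGcd p e)) + t * PySem.Int.floordiv p (pyGcd p e) < (p.toNat : Int) := by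
        intro t ht0 htG
        have hr00 := PySem.Int.mod_nonneg (a := PySem.Int.floordiv ka.1 (pyGcd p e) *
          pyModInv (PySem.Int.floordiv e (pyGcd p e)) (PySem.Int.floordiv p (pyGcd p e))) hq0'
        have hr0q := PySem.Int.mod_lt (a := PySem.Int.floordiv ka.1 (pyGcd p e) *
          pyModInv (PySem.Int.floordiv e (pyGcd p e)) (PySem.Int.floordiv p (pyGcd p e))) hq0'
        constructor
        · exact add_nonneg hr00 (mul_nonneg ht0 (le_of_lt hq0'))
        · have hmul : t * PySem.Int.floordiv p (pyGcd p e)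
              ≤ (pyGcd p e - 1) * PySem.Int.floordiv p (pyGcd p e) :=
            mul_le_mul_of_nonneg_right (by omega) (le_of_lt hq0')
          have hexp : (pyGcd p e - 1) * PySem.Int.floordiv p (pyGcd p e)
              = pyGcd p e * PySem.Int.floordiv p (pyGcd p e) - PySem.Int.floordiv p (pyGcd p e) := by
            ring
          have hcast : (p.toNat : Int) = p := by omega
          rw [hcast]
          linarith [hpq']
      obtain ⟨m1, m2⟩ := pv_tfold
        (PySem.Int.mod (PySem.Int.floordiv ka.1 (pyGcd p e) *
            pyModInv (PySem.Int.floordiv e (pyGcd p e)) (PySem.Int.floordiv p (pyGcd p e)))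
          (PySem.Int.floordiv p (pyGcd p e)))
        (PySem.Int.floordiv p (pyGcd p e)) (pyGcd p e) p.toNat (d, ka.2) hq0' hbound
        (pyGcd p e).toNat 0 (by omega) le_rfl rows hlen
      obtain ⟨l1, l2⟩ := ih _ m1
      refine ⟨l1, fun j hj => ?_⟩
      rw [l2 j hj, m2 j hj]
      have hj0 : (0 : Int) ≤ (j : Int) := by positivity
      have hjp : (j : Int) < p := by omega
      have hsols := pv_sols p e ka.1 hp he0 hep hc.2.2.1 hc.2.2.2.1 hc.2.2.2.2 (j : Int) hj0 hjp
      by_cases hC : 1 ≤ (j : Int) ∧ 0 ≤ ka.2 ∧ ka.2 ≤ M - d ∧ PySem.Int.mod ((j : Int) * e) p = ka.1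
      · have hcond : 1 ≤ (j : Int) ∧ ∃ t ∈ PySem.List.pyRange 0 (pyGcd p e) 1,
            (j : Int) = PySem.Int.mod (PySem.Int.floordiv ka.1 (pyGcd p e) *
                pyModInv (PySem.Int.floordiv e (pyGcd p e)) (PySem.Int.floordiv p (pyGcd p e)))
              (PySem.Int.floordiv p (pyGcd p e)) + t * PySem.Int.floordiv p (pyGcd p e) :=
          ⟨hC.1, hsols.mpr hC.2.2.2⟩
        rw [if_pos hcond]
        have hfa : (if 1 ≤ (j : Int) ∧ 0 ≤ ka.2 ∧ ka.2 ≤ M - d ∧ PySem.Int.mod ((j : Int) * e) p = ka.1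
            then some (d, ka.2) else none) = some (d, ka.2) := if_pos hC
        rw [List.filterMap_cons, hfa]
        simp [List.append_assoc]
      · have hcond : ¬ (1 ≤ (j : Int) ∧ ∃ t ∈ PySem.List.pyRange 0 (pyGcd p e) 1,
            (j : Int) = PySem.Int.mod (PySem.Int.floordiv ka.1 (pyGcd p e) *
                pyModInv (PySem.Int.floordiv e (pyGcd p e)) (PySem.Int.floordiv p (pyGcd p e)))
              (PySem.Int.floordiv p (pyGcd p e)) + t * PySem.Int.floordiv p (pyGcd p e)) := by
          rintro ⟨hj1, hex⟩
          exact hC ⟨hj1, hc.1, hc.2.1, hsols.mp hex⟩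
        rw [if_neg hcond, List.append_nil]
        have hfa : (if 1 ≤ (j : Int) ∧ 0 ≤ ka.2 ∧ ka.2 ≤ M - d ∧ PySem.Int.mod ((j : Int) * e) p = ka.1
            then some (d, ka.2) else none) = none := if_neg hC
        rw [List.filterMap_cons, hfa]
    · rw [if_neg hc]
      obtain ⟨l1, l2⟩ := ih rows hlen
      refine ⟨l1, fun j hj => ?_⟩
      rw [l2 j hj]
      have hnone : ¬ (1 ≤ (j : Int) ∧ 0 ≤ ka.2 ∧ ka.2 ≤ M - d ∧
          PySem.Int.mod ((j : Int) * e) p = ka.1) := by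
        rintro ⟨hj1, ha0, haM, hke⟩
        apply hc
        refine ⟨ha0, haM, ?_, ?_, ?_⟩
        · rw [← hke]
          exact PySem.Int.mod_nonneg (a := (j : Int) * e) hp0
        · rw [← hke]
          exact PySem.Int.mod_lt (a := (j : Int) * e) hp0
        · rw [PySem.Int.mod_eq_zero_iff_dvd, ← hke]
          have hfm := PySem.Int.floordiv_mul_add_mod ((j : Int) * e) p
          have hrw : PySem.Int.mod ((j : Int) * e) p
              = (j : Int) * e - PySem.Int.floordiv ((j : Int) * e) p * p := by omega
          rw [hrw]
          exact dvd_sub (Dvd.dvd.mul_left hGe' _) (Dvd.dvd.mul_left hGp' _)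
      have hfa : (if 1 ≤ (j : Int) ∧ 0 ≤ ka.2 ∧ ka.2 ≤ M - d ∧ PySem.Int.mod ((j : Int) * e) p = ka.1
          then some (d, ka.2) else none) = none := if_neg hnone
      rw [List.filterMap_cons, hfa]

-- ---- rows characterization, all deltas ----

theorem pv_rowsB2 (M g p : Int) (hp : 1 < p) (l : List (Int × Int)) :
    ∀ (es : List (Int × Int)), (∀ x ∈ es, x.2 = PySem.List.pyGetD (compute_c_deltas M g p) x.1 0) →
    ∀ (rows : List (List (Int × Int))), rows.length = p.toNat →
      ((es.foldl (fun rows dc =>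
          if dc.2 = 0 then rows
          else
            let e := PySem.Int.powMod dc.2 (p - 2).toNat p
            let g0 := pyGcd p e
            let q := PySem.Int.floordiv p g0
            let inv := pyModInv (PySem.Int.floordiv e g0) q
            let hi := M - dc.1
            (pyFirstOccs l).foldl (fun rows ka =>
              if 0 ≤ ka.2 ∧ ka.2 ≤ hi ∧ 0 ≤ ka.1 ∧ ka.1 < p ∧ PySem.Int.mod ka.1 g0 = 0 then
                let r0 := PySem.Int.mod (PySem.Int.floordiv ka.1 g0 * inv) q
                (PySem.List.pyRange 0 g0 1).foldl (fun rows t =>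
                  let r := r0 + t * q
                  if 1 ≤ r then rows.set r.toNat (rows.getD r.toNat [] ++ [(dc.1, ka.2)]) else rows) rows
              else rows) rows) rows).length = p.toNat ∧
       ∀ j : Nat, j < p.toNat →
        (es.foldl (fun rows dc =>
          if dc.2 = 0 then rows
          else
            let e := PySem.Int.powMod dc.2 (p - 2).toNat p
            let g0 := pyGcd p e
            let q := PySem.Int.floordiv p g0
            let inv := pyModInv (PySem.Int.floordiv e g0) q
            let hi := M - dc.1
            (pyFirstOccs l).foldl (fun rows ka =>
              if 0 ≤ ka.2 ∧ ka.2 ≤ hi ∧ 0 ≤ ka.1 ∧ ka.1 < p ∧ PySem.Int.mod ka.1 g0 = 0 then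
                let r0 := PySem.Int.mod (PySem.Int.floordiv ka.1 g0 * inv) q
                (PySem.List.pyRange 0 g0 1).foldl (fun rows t =>
                  let r := r0 + t * q
                  if 1 ≤ r then rows.set r.toNat (rows.getD r.toNat [] ++ [(dc.1, ka.2)]) else rows) rows
              else rows) rows) rows).getD j []
        = rows.getD j [] ++
            (if 1 ≤ (j : Int) then
              es.filterMap (fun x => pvHit M g p (PySem.Dict.mk l) x.1 (j : Int)) else [])) := by
  have hp2 : 2 ≤ p := by omega
  have hp0 : 0 < p := by omega
  intro es
  induction es with
  | nil =>
    intro _ rows hlen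
    refine ⟨hlen, fun j hj => ?_⟩
    by_cases hj1 : 1 ≤ (j : Int)
    · simp [hj1]
    · simp [hj1]
  | cons dc es ih =>
    intro hes rows hlen
    have hdc : dc.2 = PySem.List.pyGetD (compute_c_deltas M g p) dc.1 0 := hes dc (List.mem_cons_self ..)
    simp only [List.foldl_cons]
    by_cases hcd : dc.2 = 0
    · rw [if_pos hcd]
      obtain ⟨l1, l2⟩ := ih (fun x hx => hes x (List.mem_cons_of_mem _ hx)) rows hlen
      refine ⟨l1, fun j hj => ?_⟩
      rw [l2 j hj]
      have hhit : pvHit M g p (PySem.Dict.mk l) dc.1 (j : Int) = none := by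
        simp [pvHit, ← hdc, hcd]
      by_cases hj1 : 1 ≤ (j : Int)
      · rw [if_pos hj1, if_pos hj1, List.filterMap_cons, hhit]
      · rw [if_neg hj1, if_neg hj1]
    · rw [if_neg hcd]
      set e := PySem.Int.powMod dc.2 (p - 2).toNat p with he
      have he0 : 0 ≤ e := by
        rw [he]
        exact PySem.Int.mod_nonneg (a := dc.2 ^ (p - 2).toNat) hp0
      have hep : e < p := by
        rw [he]
        exact PySem.Int.mod_lt (a := dc.2 ^ (p - 2).toNat) hp0
      obtain ⟨m1, m2⟩ := pv_entries M dc.1 p e hp2 he0 hep (pyFirstOccs l) rows hlen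
      obtain ⟨l1, l2⟩ := ih (fun x hx => hes x (List.mem_cons_of_mem _ hx)) _ m1
      refine ⟨l1, fun j hj => ?_⟩
      rw [l2 j hj, m2 j hj]
      have hnodup := pv_fo_nodup l.length l le_rfl
      have hcol := pv_fmkey (PySem.Int.mod ((j : Int) * e) p) dc.1 0 (M - dc.1) (1 ≤ (j : Int))
        (pyFirstOccs l) hnodup
      rw [hcol, pv_fo_find l.length l le_rfl (PySem.Int.mod ((j : Int) * e) p)]
      have hget := pv_get?_eq_find l (PySem.Int.mod ((j : Int) * e) p)
      rcases hfind : l.find? (fun ka => ka.1 == PySem.Int.mod ((j : Int) * e) p) with _ | ka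
      · rw [hfind] at hget
        simp only [Option.map_none] at hget
        have hhit : pvHit M g p (PySem.Dict.mk l) dc.1 (j : Int) = none := by
          simp only [pvHit, ← hdc, if_neg hcd, ← he, hget]
        by_cases hj1 : 1 ≤ (j : Int)
        · rw [if_pos hj1, if_pos hj1, List.filterMap_cons, hhit]
          simp [hfind]
        · rw [if_neg hj1, if_neg hj1]
          simp [hfind]
      · rw [hfind] at hget
        simp only [Option.map_some] at hget
        have hhit : pvHit M g p (PySem.Dict.mk l) dc.1 (j : Int)
            = if 0 ≤ ka.2 ∧ ka.2 ≤ M - dc.1 then some (dc.1, ka.2) else none := by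
          simp only [pvHit, ← hdc, if_neg hcd, ← he, hget]
        by_cases hj1 : 1 ≤ (j : Int)
        · rw [if_pos hj1, if_pos hj1, List.filterMap_cons, hhit]
          by_cases hb : 0 ≤ ka.2 ∧ ka.2 ≤ M - dc.1
          · rw [if_pos hb]
            simp only [hfind]
            rw [if_pos ⟨hj1, hb.1, hb.2⟩]
            simp [List.append_assoc]
          · rw [if_neg hb]
            simp only [hfind]
            rw [if_neg (fun hx => hb ⟨hx.2.1, hx.2.2⟩)]
            simp
        · rw [if_neg hj1, if_neg hj1]
          simp only [hfind]
          rw [if_neg (fun hx => hj1 hx.1)]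
          simp

theorem pv_rowR (M g p : Int) (l : List (Int × Int)) (r : Int)
    (hr : r ∈ PySem.List.pyRange 1 p 1) :
    (pvRowsB M g p l).getD r.toNat [] = pvRow M g p (PySem.Dict.mk l) r := by
  obtain ⟨h1, h2⟩ := PySem.List.mem_pyRange_one.mp hr
  have hp : 1 < p := by omega
  rw [pvRowsB, if_pos hp]
  have hes : ∀ x ∈ PySem.List.enumerate (compute_c_deltas M g p),
      x.2 = PySem.List.pyGetD (compute_c_deltas M g p) x.1 0 := by
    rw [pv_enum_cdeltas]
    intro x hx
    obtain ⟨j, hj, rfl⟩ := List.mem_map.mp hx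
    rfl
  have hlen0 : (List.replicate p.toNat ([] : List (Int × Int))).length = p.toNat :=
    List.length_replicate
  obtain ⟨-, l2⟩ := pv_rowsB2 M g p hp l (PySem.List.enumerate (compute_c_deltas M g p)) hes _ hlen0
  have hj : r.toNat < p.toNat := by omega
  have key := l2 r.toNat hj
  rw [if_pos (by omega), Int.toNat_of_nonneg (by omega)] at key
  have hfm : (PySem.List.enumerate (compute_c_deltas M g p)).filterMap
      (fun x => pvHit M g p (PySem.Dict.mk l) x.1 r) = pvRow M g p (PySem.Dict.mk l) r := by
    rw [pv_enum_cdeltas, List.filterMap_map]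
    rfl
  rw [hfm, List.getD_replicate [] hj, List.nil_append] at key
  exact key

theorem pv_st_eq (M g p : Int) (l : List (Int × Int)) : pvStA M g p l = pvStB M g p l := by
  have hA := pv_foldl_pair (fun (st : PySem.Dict Int Int × PySem.Dict Int (List (Int × Int))) (r : Int) =>
      (PySem.List.pyRange 0 (M + 1) 1).foldl (fun st delta =>
        let cd := PySem.List.pyGetD (compute_c_deltas M g p) delta 0
        if cd = 0 then st
        else
          let ratio := PySem.Int.mod (r * PySem.Int.powMod cd (p - 2).toNat p) p
          match (PySem.Dict.mk l).get? ratio with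
          | some a =>
            if 0 ≤ a ∧ a ≤ M - delta then
              (st.1.modify r 0 (· + 1), st.2.modify r [] (· ++ [(delta, a)]))
            else st
          | none => st) st)
      (fun r => ¬ (pvRow M g p (PySem.Dict.mk l) r = []))
      (fun r => ((pvRow M g p (PySem.Dict.mk l) r).length : Int))
      (fun r => pvRow M g p (PySem.Dict.mk l) r)
      (fun st r h1 h2 => by
        obtain ⟨N, C⟩ := st
        exact pv_stepA M g p (PySem.Dict.mk l) r N C h1 h2)
      (PySem.List.pyRange 1 p 1) (PySem.List.nodup_pyRange_one 1 p)
      PySem.Dict.empty PySem.Dict.empty (fun x _ => rfl) (fun x _ => rfl)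
  have hB := pv_foldl_pair (fun (st : PySem.Dict Int Int × PySem.Dict Int (List (Int × Int))) (r : Int) =>
      let row := (pvRowsB M g p l).getD r.toNat []
      if row ≠ [] then (st.1.insert r (row.length : Int), st.2.insert r row) else st)
      (fun r => ¬ ((pvRowsB M g p l).getD r.toNat [] = []))
      (fun r => (((pvRowsB M g p l).getD r.toNat []).length : Int))
      (fun r => (pvRowsB M g p l).getD r.toNat [])
      (fun st r h1 h2 => rfl)
      (PySem.List.pyRange 1 p 1) (PySem.List.nodup_pyRange_one 1 p)
      PySem.Dict.empty PySem.Dict.empty (fun x _ => rfl) (fun x _ => rfl)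
  have hfil : (PySem.List.pyRange 1 p 1).filter
        (fun r => decide (¬ ((pvRowsB M g p l).getD r.toNat [] = [])))
      = (PySem.List.pyRange 1 p 1).filter
        (fun r => decide (¬ (pvRow M g p (PySem.Dict.mk l) r = []))) := by
    refine List.filter_congr ?_
    intro r hr
    rw [pv_rowR M g p l r hr]
  have hmap1 : ((PySem.List.pyRange 1 p 1).filter
        (fun r => decide (¬ (pvRow M g p (PySem.Dict.mk l) r = [])))).map
        (fun r => (r, (((pvRowsB M g p l).getD r.toNat []).length : Int)))
      = ((PySem.List.pyRange 1 p 1).filter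
        (fun r => decide (¬ (pvRow M g p (PySem.Dict.mk l) r = [])))).map
        (fun r => (r, ((pvRow M g p (PySem.Dict.mk l) r).length : Int))) := by
    refine List.map_congr_left ?_
    intro r hr
    rw [pv_rowR M g p l r (List.mem_of_mem_filter hr)]
  have hmap2 : ((PySem.List.pyRange 1 p 1).filter
        (fun r => decide (¬ (pvRow M g p (PySem.Dict.mk l) r = [])))).map
        (fun r => (r, (pvRowsB M g p l).getD r.toNat []))
      = ((PySem.List.pyRange 1 p 1).filter
        (fun r => decide (¬ (pvRow M g p (PySem.Dict.mk l) r = [])))).map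
        (fun r => (r, pvRow M g p (PySem.Dict.mk l) r)) := by
    refine List.map_congr_left ?_
    intro r hr
    rw [pv_rowR M g p l r (List.mem_of_mem_filter hr)]
  rw [pvStA, pvStB, hA, hB, hfil, hmap1, hmap2]

theorem pv_cz_eq (M g p : Int) : pvCzA M g p = pvCzB M g p := by
  rw [pvCzB, pv_enum_cdeltas, List.filter_map, List.map_map]
  have h := pv_foldl_add_if (fun delta => M - delta + 1)
    (fun delta => PySem.List.pyGetD (compute_c_deltas M g p) delta 0 = 0) (PySem.List.pyRange 0 (M + 1) 1) 0
  rw [pvCzA, h, zero_add]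
  rfl

theorem pv_ports_eq (M : Int) (g : Int) (p : Int) (ord2 : Int) (dlog_table : List (Int × Int)) :
    compute_Nr_all M g p ord2 dlog_table = compute_Nr_all_alt M g p ord2 dlog_table := by
  rw [pv_A_eq, pv_B_eq, pv_st_eq, pv_cz_eq]

-- ===== VERDICT (by name: the statement is the Claim_ definition above) =====
theorem compute_Nr_all_spec : Claim_equal_compute_Nr_all := by
  intro M g p ord2 dlog_table _ _
  unfold Spec_compute_Nr_all
  exact pv_ports_eq M g p ord2 dlog_table
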